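-- pv_equiv track=rewrite | github.com/chenyh200807/luban-deep | deeptutor/services/rag/exact_authority.py | _normalize_mcq_answer_letters
-- ===== SOURCE A (Python) =====
-- from typing import Any
--
-- def _normalize_mcq_answer_letters(answer: Any) -> str:
--     if isinstance(answer, list):
--         raw = "".join(str(item or "") for item in answer)
--     elif isinstance(answer, dict):
--         raw = "".join(str(value or "") for value in answer.values())
--     else:
--         raw = str(answer or "")
--     letters = "".join(ch for ch in raw.upper() if "A" <= ch <= "E")
--     return "".join(sorted(set(letters)))
-- ===== SOURCE B (Python) =====
-- def _normalize_mcq_answer_letters(answer):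
--     if isinstance(answer, list):
--         raw = "".join(str(item or "") for item in answer)
--     elif isinstance(answer, dict):
--         raw = "".join(str(value or "") for value in answer.values())
--     else:
--         raw = str(answer or "")
--     up = raw.upper()
--     return "".join(L for L in "ABCDE" if L in up)
-- ===== Notes on version B (the rewrite author's own statement) =====
-- stated objective: simpler
-- what changed: Instead of filtering the input into a letters string and sorting its set, B scans the constant five-letter alphabet in its natural order and emits each letter found in the uppercased input, so no intermediate set and no sort are needed.
import Mathlib
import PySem

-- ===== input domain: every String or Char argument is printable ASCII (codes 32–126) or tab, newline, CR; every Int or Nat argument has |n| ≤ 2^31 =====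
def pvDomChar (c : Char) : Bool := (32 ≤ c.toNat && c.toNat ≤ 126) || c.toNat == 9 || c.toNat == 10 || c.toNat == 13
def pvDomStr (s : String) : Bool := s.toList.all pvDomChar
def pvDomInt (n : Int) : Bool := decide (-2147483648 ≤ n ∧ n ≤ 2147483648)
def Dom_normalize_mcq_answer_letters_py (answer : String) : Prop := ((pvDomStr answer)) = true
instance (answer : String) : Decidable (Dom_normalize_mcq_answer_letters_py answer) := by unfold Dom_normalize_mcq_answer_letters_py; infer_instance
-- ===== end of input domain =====

-- B replaces filter-then-sorted(set(...)) by five substring-membership tests scanned in the fixed order "ABCDE" (objective: simpler; a timing run also measured B faster).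
-- On a str argument the list/dict branches of the Python are dead; the else branch 'str(answer or "")' is the identity coalescing ported below.

-- ===== PORT A =====
def normalize_mcq_answer_letters_py (answer : String) : String :=
  let raw := if answer = "" then "" else answer          -- str(answer or "")
  let letters := (PySem.Str.upper raw).toList.filter (fun ch => decide ('A' ≤ ch) && decide (ch ≤ 'E'))
  String.ofList (PySem.List.sorted (PySem.Set.ofList letters) (fun x => x) false)

-- ===== PORT B =====
def normalize_mcq_answer_letters_py_alt (answer : String) : String :=
  let raw := if answer = "" then "" else answer          -- str(answer or "")
  let up := PySem.Str.upper raw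
  String.ofList (['A', 'B', 'C', 'D', 'E'].filter (fun L => PySem.Str.isIn (String.ofList [L]) up))

-- ===== PRECONDITION & SPEC =====
def Spec_normalize_mcq_answer_letters_py (answer : String) (out : String) : Prop := out = normalize_mcq_answer_letters_py_alt answer
instance (answer : String) (out : String) : Decidable (Spec_normalize_mcq_answer_letters_py answer out) := by unfold Spec_normalize_mcq_answer_letters_py; infer_instance

-- ===== CLAIM (what is proved, stated in full; the proofs are below) =====
def Claim_equal_normalize_mcq_answer_letters_py : Prop := ∀ (answer : String), Dom_normalize_mcq_answer_letters_py answer → Spec_normalize_mcq_answer_letters_py answer (normalize_mcq_answer_letters_py answer)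

-- ===== LEMMAS AND PROOFS =====

lemma pv_char_range_iff (x : Char) : ('A' ≤ x ∧ x ≤ 'E') ↔ x ∈ ['A', 'B', 'C', 'D', 'E'] := by
  constructor
  · rintro ⟨h1, h2⟩
    have h1' : (65 : Nat) ≤ x.toNat := h1
    have h2' : x.toNat ≤ 69 := h2
    interval_cases h : x.toNat <;>
      · have hx := congrArg Char.ofNat h
        simp only [Char.ofNat_toNat] at hx
        subst hx; decide
  · intro hx
    fin_cases hx <;> exact ⟨by decide, by decide⟩

lemma pv_key (s : String) :
    PySem.List.sorted
        (PySem.Set.ofList (s.toList.filter (fun ch => decide ('A' ≤ ch) && decide (ch ≤ 'E'))))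
        (fun x => x) false
      = ['A', 'B', 'C', 'D', 'E'].filter (fun L => PySem.Str.isIn (String.ofList [L]) s) := by
  apply PySem.List.sorted_eq_of_perm_of_pairwise_lt
  · have nd1 : (List.filter (fun L => PySem.Str.isIn (String.ofList [L]) s) ['A', 'B', 'C', 'D', 'E']).Nodup :=
      List.Nodup.filter _ (by decide)
    rw [List.perm_ext_iff_of_nodup nd1 (PySem.Set.nodup_ofList _)]
    intro x
    simp only [List.mem_filter, PySem.Set.mem_ofList, Bool.and_eq_true, decide_eq_true_eq]
    constructor
    · rintro ⟨hm, hin⟩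
      have : x ∈ s.toList := by
        have := (PySem.Str.isIn_iff_infix (String.ofList [x]) s).mp hin
        simpa [List.singleton_infix_iff] using this
      exact ⟨this, (pv_char_range_iff x).mpr hm⟩
    · rintro ⟨hm, hr⟩
      refine ⟨(pv_char_range_iff x).mp hr, ?_⟩
      exact (PySem.Str.isIn_iff_infix (String.ofList [x]) s).mpr
        (by simpa [List.singleton_infix_iff] using hm)
  · exact List.Pairwise.sublist List.filter_sublist (by decide)

-- ===== VERDICT (by name: the statement is the Claim_ definition above) =====
theorem normalize_mcq_answer_letters_py_spec : Claim_equal_normalize_mcq_answer_letters_py := by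
  intro answer _
  unfold Spec_normalize_mcq_answer_letters_py normalize_mcq_answer_letters_py normalize_mcq_answer_letters_py_alt
  exact congrArg String.ofList (pv_key _)
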